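-- pv_equiv track=rewrite | github.com/myanagis/dbx-financials | shared/pdf_reader.py | compress_intervals
-- ===== SOURCE A (Python) =====
-- def compress_intervals(intervals, gap=2):
--     compressed = []
--     start = intervals[0][0]
--     for i, (orig_start, orig_end) in enumerate(intervals):
--         width = orig_end - orig_start
--         end = start + width
--         compressed.append((start, end))
--         start = end + gap  # next interval starts after current + gap
--     return compressed
-- ===== SOURCE B (Python) =====
-- from itertools import accumulate
--
-- def compress_intervals(intervals, gap=2):
--     widths = [e - s for s, e in intervals]
--     starts = accumulate(widths[:-1], lambda acc, w: acc + w + gap,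
--                         initial=intervals[0][0])
--     return [(s, s + w) for s, w in zip(starts, widths)]
-- ===== Notes on version B (the rewrite author's own statement) =====
-- stated objective: alternative
-- what changed: Replaces the single running-cursor loop that appends pairs with three separate passes: a widths table, a prefix-sum of start positions via itertools.accumulate, and a zip that emits (start, start+width).
import Mathlib
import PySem

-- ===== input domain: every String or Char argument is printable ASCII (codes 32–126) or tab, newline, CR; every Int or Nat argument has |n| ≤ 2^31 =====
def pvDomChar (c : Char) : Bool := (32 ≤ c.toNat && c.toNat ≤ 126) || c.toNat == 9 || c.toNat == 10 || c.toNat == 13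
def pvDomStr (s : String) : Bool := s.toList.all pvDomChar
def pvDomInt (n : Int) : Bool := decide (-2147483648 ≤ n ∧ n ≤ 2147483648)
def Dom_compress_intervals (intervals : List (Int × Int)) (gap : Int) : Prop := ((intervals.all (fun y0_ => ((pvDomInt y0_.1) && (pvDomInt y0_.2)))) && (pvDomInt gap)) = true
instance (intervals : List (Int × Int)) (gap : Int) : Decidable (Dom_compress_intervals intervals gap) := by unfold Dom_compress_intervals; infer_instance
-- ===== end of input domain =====

-- ===== PORT A =====
-- B repacks the same intervals via a widths table + accumulate prefix-sum + zip instead of A's single running-cursor loop (alternative decomposition, same cost; return-value equivalence, no mutation involved).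
def compress_intervals (intervals : List (Int × Int)) (gap : Int) : List (Int × Int) :=
  -- intervals[0][0]: IndexError on [] excluded by Pre_; getD 0 is never used inside Pre_
  let start0 : Int := ((PySem.List.pyGet? intervals 0).map Prod.fst).getD 0
  (intervals.foldl
    (fun (acc : List (Int × Int) × Int) p =>
      let width := p.2 - p.1
      let e := acc.2 + width
      (acc.1 ++ [(acc.2, e)], e + gap))
    ([], start0)).1

-- ===== PORT B =====
def compress_intervals_alt (intervals : List (Int × Int)) (gap : Int) : List (Int × Int) :=
  let widths := intervals.map (fun p => p.2 - p.1)
  -- intervals[0][0]: IndexError on [] excluded by Pre_; getD 0 is never used inside Pre_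
  let base : Int := ((PySem.List.pyGet? intervals 0).map Prod.fst).getD 0
  let starts := List.scanl (fun acc w => acc + w + gap) base widths.dropLast
  (starts.zip widths).map (fun p => (p.1, p.1 + p.2))

-- ===== PRECONDITION & SPEC =====
-- Pre_ excludes exactly the empty list, on which A (and B) raise IndexError at intervals[0][0].
def Pre_compress_intervals (intervals : List (Int × Int)) (gap : Int) : Prop := intervals ≠ []
instance (intervals : List (Int × Int)) (gap : Int) : Decidable (Pre_compress_intervals intervals gap) := by unfold Pre_compress_intervals; infer_instance
def pvWitness_compress_intervals : (List (Int × Int)) × Int := ([(0, 3), (10, 14)], 2)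

def Spec_compress_intervals (intervals : List (Int × Int)) (gap : Int) (out : List (Int × Int)) : Prop := out = compress_intervals_alt intervals gap
instance (intervals : List (Int × Int)) (gap : Int) (out : List (Int × Int)) : Decidable (Spec_compress_intervals intervals gap out) := by unfold Spec_compress_intervals; infer_instance

-- ===== CLAIM (what is proved, stated in full; the proofs are below) =====
def Claim_equal_compress_intervals : Prop := ∀ (intervals : List (Int × Int)) (gap : Int), Dom_compress_intervals intervals gap → Pre_compress_intervals intervals gap → Spec_compress_intervals intervals gap (compress_intervals intervals gap)

-- ===== LEMMAS AND PROOFS =====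

-- reference recursion both ports are reduced to
def specList (gap : Int) : List (Int × Int) → Int → List (Int × Int)
  | [], _ => []
  | p :: t, s => (s, s + (p.2 - p.1)) :: specList gap t (s + (p.2 - p.1) + gap)

theorem foldlA_eq_specList (gap : Int) (l : List (Int × Int)) :
    ∀ (acc : List (Int × Int)) (s : Int),
      (l.foldl
        (fun (acc : List (Int × Int) × Int) p =>
          let width := p.2 - p.1
          let e := acc.2 + width
          (acc.1 ++ [(acc.2, e)], e + gap))
        (acc, s)).1 = acc ++ specList gap l s := by
  induction l with
  | nil => intro acc s; simp [specList]
  | cons p t ih =>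
      intro acc s
      simp only [List.foldl_cons, specList]
      rw [ih]
      simp

theorem scanlB_eq_specList (gap : Int) (l : List (Int × Int)) :
    ∀ (s : Int),
      ((List.scanl (fun acc w => acc + w + gap) s (l.map (fun p => p.2 - p.1)).dropLast).zip
          (l.map (fun p => p.2 - p.1))).map (fun p => (p.1, p.1 + p.2))
        = specList gap l s := by
  induction l with
  | nil => intro s; simp [specList]
  | cons p t ih =>
      intro s
      cases t with
      | nil => simp [specList, List.scanl]
      | cons q u =>
          simp only [List.map_cons, List.dropLast_cons_of_ne_nil (by simp :
            (q.2 - q.1) :: u.map (fun p => p.2 - p.1) ≠ []), List.scanl]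
          simpa [specList] using ih (s + (p.2 - p.1) + gap)

-- ===== VERDICT (by name: the statement is the Claim_ definition above) =====
theorem compress_intervals_spec : Claim_equal_compress_intervals := by
  intro intervals gap _ hpre
  unfold Spec_compress_intervals compress_intervals compress_intervals_alt
  rw [foldlA_eq_specList, scanlB_eq_specList]
  simp
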